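-- pv_equiv track=rewrite | github.com/nicholas-wacks/nwacks-project-euler | Euler/Complete/Problem90.py | isValidCombo
-- ===== SOURCE A (Python) =====
-- squares = ["01", "04", "06", "16", "25", "36", "46", "64", "81"]
--
-- def isValidCombo(s1, s2):
--     d1 = set(s1[:])
--     d2 = set(s2[:])
--     if ("9" in d1):
--         d1.add("6")
--     if ("9" in d2):
--         d2.add("6")
--     for square in squares:
--         if ((square[0] not in d1 or square[1] not in d2) and (square[0] not in d2 or square[1] not in d1)):
--             return False
--     return True
-- ===== SOURCE B (Python) =====
-- squares = ["01", "04", "06", "16", "25", "36", "46", "64", "81"]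
--
-- REQUIRED = 0
-- for sq in squares:
--     REQUIRED |= 1 << int(sq)
--
--
-- def digitMask(faces):
--     # 10-bit mask of the digit faces of a die, with the 9->6 expansion done in bits
--     m = 0
--     for f in faces:
--         if len(f) == 1 and "0" <= f <= "9":
--             m |= 1 << (ord(f) - 48)
--     if (m >> 9) & 1:
--         m |= 1 << 6
--     return m
--
--
-- def isValidCombo(s1, s2):
--     # bit-parallel: bit 10*a+b of `pairs` says digit pair (a,b) is producible;
--     # one subset test against the constant REQUIRED mask decides the answer
--     m1 = digitMask(s1)
--     m2 = digitMask(s2)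
--     pairs = 0
--     for a in range(10):
--         if (m1 >> a) & 1:
--             pairs |= m2 << (10 * a)
--         if (m2 >> a) & 1:
--             pairs |= m1 << (10 * a)
--     return pairs & REQUIRED == REQUIRED
-- ===== Notes on version B (the rewrite author's own statement) =====
-- stated objective: alternative
-- what changed: B swaps string sets for integer bitsets: each die is condensed to a 10-bit digit mask, a 100-bit reachable-pair bitset is built by shift-ORing one mask into the slots of the other's set digits, and the answer is a single AND-comparison against a constant REQUIRED mask, instead of A's per-square scan with a four-term set-membership disjunction and early return.
import Mathlib
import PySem

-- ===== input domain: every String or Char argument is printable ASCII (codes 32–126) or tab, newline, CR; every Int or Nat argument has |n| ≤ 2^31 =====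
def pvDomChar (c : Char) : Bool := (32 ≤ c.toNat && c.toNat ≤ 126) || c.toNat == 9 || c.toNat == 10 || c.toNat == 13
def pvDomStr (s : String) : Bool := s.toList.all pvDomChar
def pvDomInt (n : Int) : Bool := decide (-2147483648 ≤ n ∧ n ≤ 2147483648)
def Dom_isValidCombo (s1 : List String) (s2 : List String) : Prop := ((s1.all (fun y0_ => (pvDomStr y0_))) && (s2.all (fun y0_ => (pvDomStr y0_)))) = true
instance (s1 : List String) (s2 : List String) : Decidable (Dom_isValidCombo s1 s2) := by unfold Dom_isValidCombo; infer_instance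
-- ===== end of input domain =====

-- B replaces A's string-set membership scan over the nine squares by integer bitsets: each die
-- becomes a 10-bit digit mask, a 100-bit reachable-pair bitset is built by shift-OR over the ten
-- digit positions, and one AND against a constant mask decides the answer (objective: alternative).

-- ===== PORT A =====
-- module constant 'squares'
def pySquares : List String := ["01", "04", "06", "16", "25", "36", "46", "64", "81"]

-- A's per-square loop condition; Python square[0]/square[1] are one-character strings,
-- ported via PySem.Str.pyGet? and String.ofList (exact; the catch-all 'false' branch is
-- unreachable because every element of pySquares has length 2).
def aCond (d1 d2 : PySem.Set String) (sq : String) : Bool :=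
  match PySem.Str.pyGet? sq 0, PySem.Str.pyGet? sq 1 with
  | some a, some b =>
      (!(PySem.Set.contains d1 (String.ofList [a])) || !(PySem.Set.contains d2 (String.ofList [b]))) &&
      (!(PySem.Set.contains d2 (String.ofList [a])) || !(PySem.Set.contains d1 (String.ofList [b])))
  | _, _ => false

-- A's for-loop with its early 'return False'
def aLoop (d1 d2 : PySem.Set String) : List String → Bool
  | [] => true
  | sq :: rest => if aCond d1 d2 sq then false else aLoop d1 d2 rest

def isValidCombo (s1 : List String) (s2 : List String) : Bool :=
  let d1 := PySem.Set.ofList (PySem.List.slice s1 none none)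
  let d2 := PySem.Set.ofList (PySem.List.slice s2 none none)
  let d1 := if PySem.Set.contains d1 "9" then PySem.Set.add d1 "6" else d1
  let d2 := if PySem.Set.contains d2 "9" then PySem.Set.add d2 "6" else d2
  aLoop d1 d2 pySquares

-- ===== PORT B =====
-- module constant REQUIRED (Source B builds it by the loop 'REQUIRED |= 1 << int(sq)';
-- int(sq) via PySem.Int.ofStr?, exact: every element of pySquares is a nonneg decimal literal)
def pyRequired : Nat :=
  pySquares.foldl (fun r sq => r ||| (1 <<< ((PySem.Int.ofStr? sq).getD 0).toNat)) 0

-- Source B's digitMask: 'len(f) == 1 and "0" <= f <= "9"' is, for a one-character string,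
-- exactly the code-point range check 48 ≤ c ≤ 57; '(m >> 9) & 1' is the bit test written out
def faceStep (m : Nat) (f : String) : Nat :=
  match f.toList with
  | [c] => if 48 ≤ c.toNat ∧ c.toNat ≤ 57 then m ||| (1 <<< (c.toNat - 48)) else m
  | _ => m

def digitMask (faces : List String) : Nat :=
  let m := faces.foldl faceStep 0
  if (m >>> 9) &&& 1 == 1 then m ||| (1 <<< 6) else m

-- Source B's 'for a in range(10)' loop building the pair bitset (range(10) → List.range 10)
def isValidCombo_alt (s1 : List String) (s2 : List String) : Bool :=
  let m1 := digitMask s1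
  let m2 := digitMask s2
  let pairs := (List.range 10).foldl (fun p a =>
    let p := if (m1 >>> a) &&& 1 == 1 then p ||| (m2 <<< (10*a)) else p
    if (m2 >>> a) &&& 1 == 1 then p ||| (m1 <<< (10*a)) else p) 0
  pairs &&& pyRequired == pyRequired

-- ===== PRECONDITION & SPEC =====
def Spec_isValidCombo (s1 : List String) (s2 : List String) (out : Bool) : Prop := out = isValidCombo_alt s1 s2
instance (s1 : List String) (s2 : List String) (out : Bool) : Decidable (Spec_isValidCombo s1 s2 out) := by unfold Spec_isValidCombo; infer_instance

-- ===== CLAIM (what is proved, stated in full; the proofs are below) =====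
def Claim_equal_isValidCombo : Prop := ∀ (s1 : List String) (s2 : List String), Dom_isValidCombo s1 s2 → Spec_isValidCombo s1 s2 (isValidCombo s1 s2)

-- ===== LEMMAS AND PROOFS =====

-- proof-side name for A's expanded die set
def expA (s : List String) : PySem.Set String :=
  if PySem.Set.contains (PySem.Set.ofList (PySem.List.slice s none none)) "9" then
    PySem.Set.add (PySem.Set.ofList (PySem.List.slice s none none)) "6"
  else PySem.Set.ofList (PySem.List.slice s none none)

-- proof-side name for Source B's raw (pre-expansion) digit mask
def rawMask (s : List String) : Nat :=
  s.foldl faceStep 0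

lemma faceStep_one (m : Nat) (f : String) (c : Char) (h : f.toList = [c]) :
    faceStep m f = if 48 ≤ c.toNat ∧ c.toNat ≤ 57 then m ||| (1 <<< (c.toNat - 48)) else m := by
  unfold faceStep; rw [h]

lemma faceStep_nil (m : Nat) (f : String) (h : f.toList = []) : faceStep m f = m := by
  unfold faceStep; rw [h]

lemma faceStep_long (m : Nat) (f : String) (c1 c2 : Char) (r : List Char)
    (h : f.toList = c1 :: c2 :: r) : faceStep m f = m := by
  unfold faceStep; rw [h]

-- proof-side name for Source B's pair bitset
def pairsOf (s1 s2 : List String) : Nat :=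
  (List.range 10).foldl (fun p x =>
    let p := if ((digitMask s1) >>> x) &&& 1 == 1 then p ||| ((digitMask s2) <<< (10*x)) else p
    if ((digitMask s2) >>> x) &&& 1 == 1 then p ||| ((digitMask s1) <<< (10*x)) else p) 0

lemma mem_expA (s : List String) (x : String) :
    x ∈ expA s ↔ x ∈ s ∨ ("9" ∈ s ∧ x = "6") := by
  unfold expA
  simp only [PySem.List.slice_none_none]
  split_ifs with h
  · rw [PySem.Set.contains_iff, PySem.Set.mem_ofList] at h
    simp [PySem.Set.mem_add, PySem.Set.mem_ofList, h]
  · rw [PySem.Set.contains_iff, PySem.Set.mem_ofList] at h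
    simp [PySem.Set.mem_ofList, h]

lemma char_eq_of_toNat (c c' : Char) (h : c.toNat = c'.toNat) : c = c' := by
  apply Char.ext
  exact UInt32.toNat_inj.mp h

-- bit d of the raw fold, for a digit char c with d = c.toNat - 48
lemma raw_testBit (s : List String) (m : Nat) (c : Char)
    (hc : 48 ≤ c.toNat ∧ c.toNat ≤ 57) :
    (s.foldl faceStep m).testBit (c.toNat - 48)
    = (m.testBit (c.toNat - 48) || decide (String.ofList [c] ∈ s)) := by
  induction s generalizing m with
  | nil => simp
  | cons f t ih =>
    rw [List.foldl_cons, ih]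
    have hf : (f = String.ofList [c]) ↔ f.toList = [c] := by
      constructor
      · intro h; rw [h]; simp
      · intro h
        have := congrArg String.ofList h
        rwa [String.ofList_toList] at this
    have hmem : decide (String.ofList [c] ∈ f :: t)
        = (decide (f = String.ofList [c]) || decide (String.ofList [c] ∈ t)) := by
      simp only [List.mem_cons]
      by_cases h : f = String.ofList [c]
      · simp [h]
      · have h2 : ¬ (String.ofList [c] = f) := fun hh => h hh.symm
        simp [h, h2]
    match hft : f.toList with
    | [] =>
      have hne : ¬ (f = String.ofList [c]) := by simp [hf, hft]
      have hne2 : ¬ (String.ofList [c] = f) := fun h => hne h.symm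
      rw [faceStep_nil m f hft]
      simp [hmem, hne, hne2]
    | [c'] =>
      rw [faceStep_one m f c' hft]
      by_cases hr : 48 ≤ c'.toNat ∧ c'.toNat ≤ 57
      · rw [if_pos hr, Nat.testBit_or, Nat.shiftLeft_eq, one_mul, Nat.testBit_two_pow]
        have hfe : (f = String.ofList [c]) ↔ c' = c := by rw [hf, hft]; simp
        by_cases hcc : c' = c
        · have hbit : c'.toNat - 48 = c.toNat - 48 := by rw [hcc]
          have hfeq : String.ofList [c] = f := (hfe.mpr hcc).symm
          simp [hbit, hfeq]
        · have hnebit : c'.toNat - 48 ≠ c.toNat - 48 :=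
            fun h => hcc (char_eq_of_toNat c' c (by omega))
          have hne : ¬ (f = String.ofList [c]) := fun h => hcc (hfe.mp h)
          have hne2 : ¬ (String.ofList [c] = f) := fun h => hne h.symm
          simp [hmem, hne, hne2, hnebit]
      · have hne : ¬ (f = String.ofList [c]) := by
          rw [hf, hft]
          intro h
          have hce : c' = c := by simpa using h
          exact hr (hce ▸ hc)
        rw [if_neg hr]
        have hne2 : ¬ (String.ofList [c] = f) := fun h => hne h.symm
        simp [hmem, hne, hne2]
    | c1 :: c2 :: r =>
      have hne : ¬ (f = String.ofList [c]) := by simp [hf, hft]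
      have hne2 : ¬ (String.ofList [c] = f) := fun h => hne h.symm
      rw [faceStep_long m f c1 c2 r hft]
      simp [hmem, hne, hne2]

lemma rawMask_testBit (s : List String) (c : Char)
    (hc : 48 ≤ c.toNat ∧ c.toNat ≤ 57) :
    (rawMask s).testBit (c.toNat - 48) = decide (String.ofList [c] ∈ s) := by
  unfold rawMask
  rw [raw_testBit s 0 c hc]
  simp

lemma bitget_eq_testBit (m a : Nat) : ((m >>> a) &&& 1 == 1) = m.testBit a := by
  simp [Nat.testBit, Nat.and_one_is_mod]

-- bit c.toNat-48 of digitMask = membership of the digit string in A's expanded set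
lemma digitMask_testBit (s : List String) (c : Char)
    (hc : 48 ≤ c.toNat ∧ c.toNat ≤ 57) :
    (digitMask s).testBit (c.toNat - 48) = decide (String.ofList [c] ∈ expA s) := by
  have h9 : (rawMask s).testBit 9 = decide (("9" : String) ∈ s) := by
    have := rawMask_testBit s '9' (by decide)
    simpa using this
  have hc9 : (('9' : Char).toNat - 48) = 9 := by decide
  show ((if ((rawMask s) >>> 9) &&& 1 == 1 then rawMask s ||| (1 <<< 6) else rawMask s)).testBit (c.toNat - 48)
      = decide (String.ofList [c] ∈ expA s)
  rw [bitget_eq_testBit, h9]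
  have hmem := mem_expA s (String.ofList [c])
  have h6 : (String.ofList [c] = ("6" : String)) ↔ c = '6' := by
    constructor
    · intro h
      have := congrArg String.toList h
      simpa using this
    · intro h; rw [h]
  by_cases h : ("9" : String) ∈ s
  · simp only [h, decide_true, if_pos]
    rw [Nat.testBit_or, Nat.shiftLeft_eq, one_mul, Nat.testBit_two_pow,
        rawMask_testBit s c hc]
    have h66 : (6 = c.toNat - 48) ↔ c = '6' := by
      constructor
      · intro hh
        have h54 : c.toNat = 54 := by omega
        exact char_eq_of_toNat c '6' (by rw [h54]; decide)
      · intro hh; subst hh; decide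
    by_cases hc6 : c = '6'
    · subst hc6
      have hin : ("6" : String) ∈ expA s := (mem_expA s _).mpr (Or.inr ⟨h, rfl⟩)
      have hin' : String.ofList ['6'] ∈ expA s := by
        have e : String.ofList ['6'] = "6" := by decide
        rw [e]; exact hin
      simp [h66, hin, hin']
    · simp [hmem, h6, hc6, h66]
  · simp only [h, decide_false, if_neg, Bool.false_eq_true, not_false_iff]
    rw [rawMask_testBit s c hc]
    simp [hmem, h]

lemma rawMask_lt (s : List String) : rawMask s < 1024 := by
  unfold rawMask
  have main : ∀ m, m < 1024 → s.foldl faceStep m < 1024 := by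
    induction s with
    | nil => intro m hm; simpa using hm
    | cons f t ih =>
      intro m hm
      rw [List.foldl_cons]
      apply ih
      match hft : f.toList with
      | [] => rw [faceStep_nil m f hft]; exact hm
      | [c'] =>
        rw [faceStep_one m f c' hft]
        by_cases hr : 48 ≤ c'.toNat ∧ c'.toNat ≤ 57
        · rw [if_pos hr]
          apply Nat.or_lt_two_pow (n := 10) hm
          rw [Nat.shiftLeft_eq, one_mul]
          exact Nat.pow_lt_pow_right (by omega) (by omega)
        · rw [if_neg hr]; exact hm
      | c1 :: c2 :: r => rw [faceStep_long m f c1 c2 r hft]; exact hm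
  exact main 0 (by omega)

lemma digitMask_lt (s : List String) : digitMask s < 1024 := by
  show (if ((rawMask s) >>> 9) &&& 1 == 1 then rawMask s ||| (1 <<< 6) else rawMask s) < 1024
  split_ifs with h
  · exact Nat.or_lt_two_pow (n := 10) (rawMask_lt s) (by decide)
  · exact rawMask_lt s

-- bit 10*a+b of a mask shifted to slot x
lemma shift_testBit (m x a b : Nat) (hm : m < 1024) (hx : x ≤ 9) (ha : a ≤ 9) (hb : b ≤ 9) :
    (m <<< (10*x)).testBit (10*a+b) = (decide (x = a) && m.testBit b) := by
  rw [Nat.testBit_shiftLeft]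
  by_cases hxa : x = a
  · subst hxa
    simp [Nat.add_sub_cancel_left, show 10*x ≤ 10*x + b by omega]
  · rcases Nat.lt_or_ge x a with hlt | hge
    · have hbit : m.testBit (10*a + b - 10*x) = false := by
        apply Nat.testBit_eq_false_of_lt
        calc m < 1024 := hm
        _ = 2^10 := by norm_num
        _ ≤ 2^(10*a + b - 10*x) := Nat.pow_le_pow_right (by omega) (by omega)
      simp [hbit, hxa]
    · have : ¬ (10*x ≤ 10*a + b) := by omega
      simp [this, hxa]

-- bit 10*a+b of the pair bitset built by Source B's range(10) loop
lemma pairs_testBit (m1 m2 : Nat) (h1 : m1 < 1024) (h2 : m2 < 1024)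
    (a b : Nat) (ha : a ≤ 9) (hb : b ≤ 9) :
    ((List.range 10).foldl (fun p x =>
      let p := if (m1 >>> x) &&& 1 == 1 then p ||| (m2 <<< (10*x)) else p
      if (m2 >>> x) &&& 1 == 1 then p ||| (m1 <<< (10*x)) else p) 0).testBit (10*a+b)
    = ((m1.testBit a && m2.testBit b) || (m2.testBit a && m1.testBit b)) := by
  have main : ∀ (L : List Nat), (∀ x ∈ L, x ≤ 9) → ∀ (p : Nat),
      ((L.foldl (fun p x =>
        let p := if (m1 >>> x) &&& 1 == 1 then p ||| (m2 <<< (10*x)) else p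
        if (m2 >>> x) &&& 1 == 1 then p ||| (m1 <<< (10*x)) else p) p).testBit (10*a+b))
      = (p.testBit (10*a+b) ||
          (decide (a ∈ L) && ((m1.testBit a && m2.testBit b) || (m2.testBit a && m1.testBit b)))) := by
    intro L
    induction L with
    | nil => intro _ p; simp
    | cons x t ih =>
      intro hL p
      rw [List.foldl_cons, ih (fun y hy => hL y (List.mem_cons_of_mem _ hy))]
      have hx9 : x ≤ 9 := hL x List.mem_cons_self
      have step : ((let p' := if (m1 >>> x) &&& 1 == 1 then p ||| (m2 <<< (10*x)) else p
          if (m2 >>> x) &&& 1 == 1 then p' ||| (m1 <<< (10*x)) else p').testBit (10*a+b))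
          = (p.testBit (10*a+b) ||
              (decide (x = a) && ((m1.testBit a && m2.testBit b) || (m2.testBit a && m1.testBit b)))) := by
        rw [bitget_eq_testBit, bitget_eq_testBit]
        by_cases hxa : x = a
        · subst hxa
          by_cases b1 : m1.testBit x <;> by_cases b2 : m2.testBit x <;>
            simp [b1, b2, Nat.testBit_or, shift_testBit m1 x x b h1 hx9 hx9 hb,
              shift_testBit m2 x x b h2 hx9 hx9 hb] <;>
            cases p.testBit (10*x+b) <;> simp
        · by_cases b1 : m1.testBit x <;> by_cases b2 : m2.testBit x <;>
            simp [b1, b2, Nat.testBit_or, shift_testBit m1 x a b h1 hx9 ha hb,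
              shift_testBit m2 x a b h2 hx9 ha hb, hxa]
      rw [step]
      have hmem : (a ∈ x :: t) ↔ (x = a ∨ a ∈ t) := by
        constructor
        · intro h; rcases List.mem_cons.mp h with h | h
          · exact Or.inl h.symm
          · exact Or.inr h
        · rintro (h | h)
          · exact h ▸ List.mem_cons_self
          · exact List.mem_cons_of_mem _ h
      by_cases hxa : x = a <;> by_cases hat : a ∈ t <;>
        simp [hmem, hxa, hat] <;> cases p.testBit (10*a+b) <;>
        cases (m1.testBit a && m2.testBit b || (m2.testBit a && m1.testBit b)) <;> simp
  rw [main (List.range 10) (by intro x hx; exact Nat.le_of_lt_succ (List.mem_range.mp hx)) 0]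
  have : a ∈ List.range 10 := List.mem_range.mpr (by omega)
  simp [this]

-- the required-mask value and its bit characterisation
lemma pyRequired_eq : pyRequired = 2^1 ||| 2^4 ||| 2^6 ||| 2^16 ||| 2^25 ||| 2^36 ||| 2^46 ||| 2^64 ||| 2^81 := by
  decide

lemma subset_req (p : Nat) :
    (p &&& pyRequired == pyRequired)
    = (p.testBit 1 && p.testBit 4 && p.testBit 6 && p.testBit 16 && p.testBit 25 &&
       p.testBit 36 && p.testBit 46 && p.testBit 64 && p.testBit 81) := by
  have hreq : ∀ i, pyRequired.testBit i =
      (decide (1 = i) || decide (4 = i) || decide (6 = i) || decide (16 = i) || decide (25 = i) ||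
       decide (36 = i) || decide (46 = i) || decide (64 = i) || decide (81 = i)) := by
    intro i
    rw [pyRequired_eq, Nat.testBit_or, Nat.testBit_or, Nat.testBit_or, Nat.testBit_or,
        Nat.testBit_or, Nat.testBit_or, Nat.testBit_or, Nat.testBit_or,
        Nat.testBit_two_pow, Nat.testBit_two_pow, Nat.testBit_two_pow, Nat.testBit_two_pow,
        Nat.testBit_two_pow, Nat.testBit_two_pow, Nat.testBit_two_pow, Nat.testBit_two_pow,
        Nat.testBit_two_pow]
  rw [Bool.eq_iff_iff]
  simp only [beq_iff_eq, Bool.and_eq_true]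
  constructor
  · intro h
    have hb : ∀ i, pyRequired.testBit i = true → p.testBit i = true := by
      intro i hi
      have := congrArg (fun n => n.testBit i) h
      simp only [Nat.testBit_and, hi, Bool.and_true] at this
      exact this
    exact ⟨⟨⟨⟨⟨⟨⟨⟨hb 1 (by rw [hreq]; decide), hb 4 (by rw [hreq]; decide)⟩,
      hb 6 (by rw [hreq]; decide)⟩, hb 16 (by rw [hreq]; decide)⟩,
      hb 25 (by rw [hreq]; decide)⟩, hb 36 (by rw [hreq]; decide)⟩,
      hb 46 (by rw [hreq]; decide)⟩, hb 64 (by rw [hreq]; decide)⟩,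
      hb 81 (by rw [hreq]; decide)⟩
  · rintro ⟨⟨⟨⟨⟨⟨⟨⟨h1, h4⟩, h6⟩, h16⟩, h25⟩, h36⟩, h46⟩, h64⟩, h81⟩
    apply Nat.eq_of_testBit_eq
    intro i
    rw [Nat.testBit_and, hreq]
    by_cases e1 : 1 = i; · subst e1; simp [h1]
    by_cases e4 : 4 = i; · subst e4; simp [h4]
    by_cases e6 : 6 = i; · subst e6; simp [h6]
    by_cases e16 : 16 = i; · subst e16; simp [h16]
    by_cases e25 : 25 = i; · subst e25; simp [h25]
    by_cases e36 : 36 = i; · subst e36; simp [h36]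
    by_cases e46 : 46 = i; · subst e46; simp [h46]
    by_cases e64 : 64 = i; · subst e64; simp [h64]
    by_cases e81 : 81 = i; · subst e81; simp [h81]
    simp [e1, e4, e6, e16, e25, e36, e46, e64, e81]

-- A's early-return loop as a conjunction
lemma aLoop_eq_all (d1 d2 : PySem.Set String) (l : List String) :
    aLoop d1 d2 l = l.all (fun sq => !(aCond d1 d2 sq)) := by
  induction l with
  | nil => rfl
  | cons h t ih =>
    rw [aLoop, List.all_cons, ih]
    cases aCond d1 d2 h <;> simp

lemma contains_dec (s : PySem.Set String) (x : String) :
    PySem.Set.contains s x = decide (x ∈ s) := by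
  rw [Bool.eq_iff_iff, PySem.Set.contains_iff]
  simp

-- A's negated per-square condition as the orientation disjunction over expA memberships
lemma aCond_neg (s1 s2 : List String) (sq : String) (a b : Char)
    (h0 : PySem.Str.pyGet? sq (0 : Int) = some a)
    (h1 : PySem.Str.pyGet? sq (1 : Int) = some b) :
    (!(aCond (expA s1) (expA s2) sq))
    = ((decide (String.ofList [a] ∈ expA s1) && decide (String.ofList [b] ∈ expA s2)) ||
       (decide (String.ofList [a] ∈ expA s2) && decide (String.ofList [b] ∈ expA s1))) := by
  unfold aCond
  rw [h0, h1]
  simp only [Bool.not_and, Bool.not_or, Bool.not_not, contains_dec]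

-- bridge for one square: B's bit test at the square's index equals A's disjunction
lemma square_bridge (s1 s2 : List String) (a b : Char) (k : Nat)
    (hca : 48 ≤ a.toNat ∧ a.toNat ≤ 57) (hcb : 48 ≤ b.toNat ∧ b.toNat ≤ 57)
    (hk : 10*(a.toNat - 48)+(b.toNat - 48) = k) :
    (pairsOf s1 s2).testBit k
    = ((decide (String.ofList [a] ∈ expA s1) && decide (String.ofList [b] ∈ expA s2)) ||
       (decide (String.ofList [a] ∈ expA s2) && decide (String.ofList [b] ∈ expA s1))) := by
  rw [← hk]
  unfold pairsOf
  rw [pairs_testBit (digitMask s1) (digitMask s2) (digitMask_lt s1) (digitMask_lt s2)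
      (a.toNat - 48) (b.toNat - 48) (by omega) (by omega),
    digitMask_testBit s1 a hca, digitMask_testBit s2 b hcb,
    digitMask_testBit s2 a hca, digitMask_testBit s1 b hcb]

-- ===== VERDICT (by name: the statement is the Claim_ definition above) =====
theorem isValidCombo_spec : Claim_equal_isValidCombo := by
  intro s1 s2 _
  show isValidCombo s1 s2 = isValidCombo_alt s1 s2
  have hA : isValidCombo s1 s2 = aLoop (expA s1) (expA s2) pySquares := rfl
  have hB : isValidCombo_alt s1 s2 = (pairsOf s1 s2 &&& pyRequired == pyRequired) := rfl
  rw [hA, hB, aLoop_eq_all, subset_req]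
  unfold pySquares
  simp only [List.all_cons, List.all_nil, Bool.and_true]
  rw [aCond_neg s1 s2 "01" '0' '1' (by decide) (by decide),
      aCond_neg s1 s2 "04" '0' '4' (by decide) (by decide),
      aCond_neg s1 s2 "06" '0' '6' (by decide) (by decide),
      aCond_neg s1 s2 "16" '1' '6' (by decide) (by decide),
      aCond_neg s1 s2 "25" '2' '5' (by decide) (by decide),
      aCond_neg s1 s2 "36" '3' '6' (by decide) (by decide),
      aCond_neg s1 s2 "46" '4' '6' (by decide) (by decide),
      aCond_neg s1 s2 "64" '6' '4' (by decide) (by decide),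
      aCond_neg s1 s2 "81" '8' '1' (by decide) (by decide),
      square_bridge s1 s2 '0' '1' 1 (by decide) (by decide) (by decide),
      square_bridge s1 s2 '0' '4' 4 (by decide) (by decide) (by decide),
      square_bridge s1 s2 '0' '6' 6 (by decide) (by decide) (by decide),
      square_bridge s1 s2 '1' '6' 16 (by decide) (by decide) (by decide),
      square_bridge s1 s2 '2' '5' 25 (by decide) (by decide) (by decide),
      square_bridge s1 s2 '3' '6' 36 (by decide) (by decide) (by decide),
      square_bridge s1 s2 '4' '6' 46 (by decide) (by decide) (by decide),
      square_bridge s1 s2 '6' '4' 64 (by decide) (by decide) (by decide),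
      square_bridge s1 s2 '8' '1' 81 (by decide) (by decide) (by decide)]
  simp only [Bool.and_assoc]
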